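-- pv_equiv track=rewrite | github.com/thepratholic/Competitive-Programming | LeetCode/Biweekly Contest 182/Minimum Generations to Target Point.py | minGenerations
-- ===== SOURCE A (Python) =====
-- from typing import List
--
-- def minGenerations(points: List[List[int]], target: List[int]) -> int:
--     target = tuple(target)
--
--     seen = set(map(tuple, points))
--
--     if target in seen:
--         return 0 # pehle se hi hai
--
--     if len(seen) < 2:
--         return -1
--
--     g = 0
--
--     while True:
--
--         arr = list(seen)
--
--         new = set()
--
--         m = len(arr)
--
--         for i in range(m):
--             x, y, z = arr[i]
--
--             for j in range(i + 1, m):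
--
--                 x2, y2, z2 = arr[j]
--
--                 c = ((x + x2) // 2, (y + y2) // 2, (z + z2) // 2)
--
--                 if c not in seen:
--                     new.add(c)
--
--         if not new:
--             return -1
--
--         g += 1
--
--         if target in new:
--             return g
--
--         seen |= new
-- ===== SOURCE B (Python) =====
-- from typing import List
--
-- def minGenerations(points: List[List[int]], target: List[int]) -> int:
--     # Recursive BFS-frontier formulation: each generation's unseen midpoints can
--     # only come from pairs touching the previous generation's new points, so we
--     # build the full frontier x seen midpoint set in one comprehension and
--     # remove seen by set difference (diagonal pairs give back seen points, so
--     # including them is harmless).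
--     t = tuple(target)
--     seen = frozenset(map(tuple, points))
--     if t in seen:
--         return 0
--     if len(seen) < 2:
--         return -1
--
--     def grow(seen, frontier, g):
--         new = {tuple((u + v) // 2 for u, v in zip(f, s))
--                for f in frontier for s in seen} - seen
--         if not new:
--             return -1
--         if t in new:
--             return g
--         return grow(seen | new, new, g + 1)
--
--     return grow(seen, seen, 1)
-- ===== Notes on version B (the rewrite author's own statement) =====
-- stated objective: alternative
-- what changed: B replaces A's per-generation indexed i<j double loop with a per-element seen-test by a recursive frontier step that builds the whole (previous new points) x seen midpoint set in one comprehension (zip-based midpoints, diagonal pairs included since they reproduce seen points) and subtracts seen as a set difference.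
import Mathlib
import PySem

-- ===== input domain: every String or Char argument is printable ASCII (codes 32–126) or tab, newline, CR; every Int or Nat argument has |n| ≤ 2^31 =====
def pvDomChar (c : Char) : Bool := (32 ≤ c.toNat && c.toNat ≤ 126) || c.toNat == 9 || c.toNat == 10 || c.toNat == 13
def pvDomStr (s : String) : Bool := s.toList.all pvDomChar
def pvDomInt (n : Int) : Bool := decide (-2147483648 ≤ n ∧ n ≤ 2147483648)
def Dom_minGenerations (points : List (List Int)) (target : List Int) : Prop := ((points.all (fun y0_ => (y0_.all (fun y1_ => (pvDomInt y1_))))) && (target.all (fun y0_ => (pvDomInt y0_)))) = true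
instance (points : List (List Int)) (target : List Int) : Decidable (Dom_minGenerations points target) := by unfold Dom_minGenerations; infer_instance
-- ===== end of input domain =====

-- B replaces A's per-generation indexed i<j double loop with a per-element seen-test
-- by a recursive frontier step: the whole (previous new points) × seen midpoint set
-- is built in one comprehension (zip-based midpoints, diagonal pairs included since
-- they reproduce seen points) and seen is removed by set difference.

-- ===== PORT A =====
-- the midpoint triple ((x+x2)//2, (y+y2)//2, (z+z2)//2) A computes from the
-- unpacked coordinates; [] stands for inputs where Python's `x, y, z = p`
-- unpacking would raise ValueError (excluded by Pre_).
def pvMid (p q : List Int) : List Int :=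
  match p, q with
  | [x, y, z], [x2, y2, z2] =>
      [PySem.Int.floordiv (x + x2) 2, PySem.Int.floordiv (y + y2) 2, PySem.Int.floordiv (z + z2) 2]
  | _, _ => []

-- `for i in range(m): for j in range(i+1, m): …` over arr = list(seen), as the
-- structural recursion "head against every later element, then recurse on the tail".
def pvPairsA (seen : PySem.Set (List Int)) : List (List Int) → PySem.Set (List Int) → PySem.Set (List Int)
  | [], new => new
  | p :: rest, new =>
      pvPairsA seen rest
        (rest.foldl (fun acc q =>
          let c := pvMid p q
          if seen.contains c then acc else acc.add c) new)

-- `while True:` loop; the fuel is only a totality guard: the Python loop always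
-- terminates (all midpoints stay inside the bounding box of the current points,
-- and `seen` grows each round), and 2^100 exceeds the number of distinct triples
-- with coordinates bounded by 2^31, so on Dom the 0-fuel branch is never reached.
def pvLoopA (target : List Int) : Nat → PySem.Set (List Int) → Int → Int
  | 0, _, _ => -1
  | fuel + 1, seen, g =>
      let new := pvPairsA seen seen PySem.Set.empty
      if new.isEmpty then -1
      else
        let g' := g + 1
        if target ∈ new then g'
        else pvLoopA target fuel (seen.union new) g'

def minGenerations (points : List (List Int)) (target : List Int) : Int :=
  let seen : PySem.Set (List Int) := PySem.Set.ofList points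
  if target ∈ seen then 0
  else if PySem.Set.len seen < 2 then -1
  else pvLoopA target (2 ^ 100) seen 0

-- ===== PORT B =====
-- tuple((u + v) // 2 for u, v in zip(f, s))
def pvMidB (p q : List Int) : List Int :=
  List.zipWith (fun u v => PySem.Int.floordiv (u + v) 2) p q

-- grow(seen, frontier, g); the set comprehension over frontier × seen becomes
-- ofList of the flatMap of midpoints, and `- seen` is Set.diff.
-- Same fuel-as-totality-guard remark as for pvLoopA.
def pvGrow (target : List Int) : Nat → PySem.Set (List Int) → PySem.Set (List Int) → Int → Int
  | 0, _, _, _ => -1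
  | fuel + 1, seen, frontier, g =>
      let new := PySem.Set.diff
        (PySem.Set.ofList (frontier.flatMap (fun f => seen.map (fun s => pvMidB f s)))) seen
      if new.isEmpty then -1
      else if target ∈ new then g
      else pvGrow target fuel (seen.union new) new (g + 1)

def minGenerations_alt (points : List (List Int)) (target : List Int) : Int :=
  let seen : PySem.Set (List Int) := PySem.Set.ofList points
  if target ∈ seen then 0
  else if PySem.Set.len seen < 2 then -1
  else pvGrow target (2 ^ 100) seen seen 1

-- ===== PRECONDITION & SPEC =====
-- Pre_ excludes exactly the inputs where the Python A raises ValueError: the loop is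
-- entered (no 0 / early -1 return) while some point does not unpack as x, y, z.
def Pre_minGenerations (points : List (List Int)) (target : List Int) : Prop :=
  (∀ p ∈ points, p.length = 3) ∨ target ∈ points ∨ (∀ p ∈ points, ∀ q ∈ points, p = q)

instance (points : List (List Int)) (target : List Int) : Decidable (Pre_minGenerations points target) := by
  unfold Pre_minGenerations; infer_instance

def pvWitness_minGenerations : List (List Int) × List Int := ([[0, 0, 0], [4, 0, 0]], [1, 0, 0])

def Spec_minGenerations (points : List (List Int)) (target : List Int) (out : Int) : Prop := out = minGenerations_alt points target
instance (points : List (List Int)) (target : List Int) (out : Int) : Decidable (Spec_minGenerations points target out) := by unfold Spec_minGenerations; infer_instance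

-- ===== CLAIM (what is proved, stated in full; the proofs are below) =====
def Claim_equal_minGenerations : Prop := ∀ (points : List (List Int)) (target : List Int), Dom_minGenerations points target → Pre_minGenerations points target → Spec_minGenerations points target (minGenerations points target)

-- ===== LEMMAS AND PROOFS =====

theorem pvMid_comm (p q : List Int) : pvMid p q = pvMid q p := by
  unfold pvMid
  rcases p with _ | ⟨a, _ | ⟨b, _ | ⟨c, _ | _⟩⟩⟩ <;>
    rcases q with _ | ⟨a', _ | ⟨b', _ | ⟨c', _ | _⟩⟩⟩ <;>
    simp [Int.add_comm]

theorem pvMid_self (p : List Int) (h : p.length = 3) : pvMid p p = p := by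
  rcases p with _ | ⟨a, _ | ⟨b, _ | ⟨c, _ | _⟩⟩⟩ <;> simp_all
  show [PySem.Int.floordiv (a + a) 2, PySem.Int.floordiv (b + b) 2, PySem.Int.floordiv (c + c) 2] = [a, b, c]
  rw [PySem.Int.floordiv_eq_ediv_of_pos (by norm_num), PySem.Int.floordiv_eq_ediv_of_pos (by norm_num), PySem.Int.floordiv_eq_ediv_of_pos (by norm_num)]
  simp; refine ⟨by omega, by omega, by omega⟩

theorem pvMid_length (p q : List Int) (hp : p.length = 3) (hq : q.length = 3) :
    (pvMid p q).length = 3 := by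
  rcases p with _ | ⟨a, _ | ⟨b, _ | ⟨c, _ | _⟩⟩⟩ <;> rcases q with _ | ⟨a', _ | ⟨b', _ | ⟨c', _ | _⟩⟩⟩ <;> simp_all [pvMid]

theorem pvMidB_eq_pvMid (p q : List Int) (hp : p.length = 3) (hq : q.length = 3) :
    pvMidB p q = pvMid p q := by
  rcases p with _ | ⟨a, _ | ⟨b, _ | ⟨c, _ | _⟩⟩⟩ <;> rcases q with _ | ⟨a', _ | ⟨b', _ | ⟨c', _ | _⟩⟩⟩ <;> simp_all [pvMid, pvMidB]

-- the inner loop of A: fold adding unseen midpoints of p with each element of l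
theorem mem_midFold (seen : PySem.Set (List Int)) (p : List Int) (l : List (List Int))
    (acc : PySem.Set (List Int)) (x : List Int) :
    x ∈ l.foldl (fun acc2 q =>
        let c := pvMid p q
        if seen.contains c then acc2 else acc2.add c) acc ↔
      x ∈ acc ∨ ∃ q ∈ l, pvMid p q = x ∧ x ∉ seen := by
  induction l generalizing acc with
  | nil => simp
  | cons a t ih =>
      simp only [List.foldl_cons]
      rw [ih]
      by_cases hm : pvMid p a ∈ seen
      · rw [if_pos ((PySem.Set.contains_iff _ _).2 hm)]
        constructor
        · rintro (h | ⟨q, hq, hmid, hx⟩)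
          · exact Or.inl h
          · exact Or.inr ⟨q, List.mem_cons_of_mem _ hq, hmid, hx⟩
        · rintro (h | ⟨q, hq, hmid, hx⟩)
          · exact Or.inl h
          · rcases List.mem_cons.1 hq with rfl | hq
            · exact absurd (hmid ▸ hm) hx
            · exact Or.inr ⟨q, hq, hmid, hx⟩
      · rw [if_neg (fun hc => hm ((PySem.Set.contains_iff _ _).1 hc))]
        constructor
        · rintro (h | ⟨q, hq, hmid, hx⟩)
          · rcases (PySem.Set.mem_add _ _ _).1 h with h | rfl
            · exact Or.inl h
            · exact Or.inr ⟨a, by simp, rfl, hm⟩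
          · exact Or.inr ⟨q, List.mem_cons_of_mem _ hq, hmid, hx⟩
        · rintro (h | ⟨q, hq, hmid, hx⟩)
          · exact Or.inl ((PySem.Set.mem_add _ _ _).2 (Or.inl h))
          · rcases List.mem_cons.1 hq with rfl | hq
            · exact Or.inl ((PySem.Set.mem_add _ _ _).2 (Or.inr hmid.symm))
            · exact Or.inr ⟨q, hq, hmid, hx⟩

theorem pvPairsA_mono (seen : PySem.Set (List Int)) (l : List (List Int))
    (new : PySem.Set (List Int)) (x : List Int) (hx : x ∈ new) : x ∈ pvPairsA seen l new := by
  induction l generalizing new with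
  | nil => exact hx
  | cons a t ih => exact ih _ ((mem_midFold seen a t new x).2 (Or.inl hx))

theorem mem_pvPairsA (seen : PySem.Set (List Int)) (l : List (List Int))
    (new : PySem.Set (List Int)) (x : List Int) :
    x ∈ pvPairsA seen l new →
      x ∈ new ∨ ∃ p ∈ l, ∃ q ∈ l, pvMid p q = x ∧ x ∉ seen := by
  induction l generalizing new with
  | nil => exact fun h => Or.inl h
  | cons a t ih =>
      intro h
      rcases ih _ h with h' | ⟨p, hp, q, hq, hmid, hx⟩
      · rcases (mem_midFold seen a t new x).1 h' with h'' | ⟨q, hq, hmid, hx⟩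
        · exact Or.inl h''
        · exact Or.inr ⟨a, by simp, q, List.mem_cons_of_mem _ hq, hmid, hx⟩
      · exact Or.inr ⟨p, List.mem_cons_of_mem _ hp, q, List.mem_cons_of_mem _ hq, hmid, hx⟩

theorem pvPairsA_of_pair (seen : PySem.Set (List Int)) (x p q : List Int) (hne : p ≠ q)
    (hmid : pvMid p q = x) (hx : x ∉ seen) :
    ∀ (l : List (List Int)) (new : PySem.Set (List Int)), p ∈ l → q ∈ l → x ∈ pvPairsA seen l new := by
  intro l
  induction l with
  | nil => intro new hp _; cases hp
  | cons a t ih =>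
      intro new hp hq
      simp only [pvPairsA]
      rcases List.mem_cons.1 hp with rfl | hp'
      · have hq' : q ∈ t := by
          rcases List.mem_cons.1 hq with rfl | h
          · exact absurd rfl hne
          · exact h
        exact pvPairsA_mono seen t _ x ((mem_midFold seen p t new x).2 (Or.inr ⟨q, hq', hmid, hx⟩))
      · rcases List.mem_cons.1 hq with rfl | hq'
        · exact pvPairsA_mono seen t _ x
            ((mem_midFold seen q t new x).2 (Or.inr ⟨p, hp', by rw [← pvMid_comm, hmid], hx⟩))
        · exact ih _ hp' hq'

-- membership in B's per-round new set
theorem mem_newB (seen : PySem.Set (List Int)) (frontier snapshot : List (List Int)) (x : List Int) :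
    x ∈ PySem.Set.diff
        (PySem.Set.ofList (frontier.flatMap (fun f => snapshot.map (fun s => pvMidB f s)))) seen ↔
      (∃ f ∈ frontier, ∃ s ∈ snapshot, pvMidB f s = x) ∧ x ∉ seen := by
  rw [PySem.Set.mem_diff, PySem.Set.mem_ofList, List.mem_flatMap]
  simp only [List.mem_map]

-- the two generations produce the same set of new points
theorem newA_eq_newB (seenA seenB frontier : PySem.Set (List Int))
    (h3 : ∀ p ∈ seenB, p.length = 3)
    (hAB : ∀ x, x ∈ seenA ↔ x ∈ seenB)
    (hf : ∀ x ∈ frontier, x ∈ seenB)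
    (hcl : ∀ a b, a ∈ seenB → b ∈ seenB → a ∉ frontier → b ∉ frontier → pvMid a b ∈ seenB)
    (x : List Int) :
    x ∈ pvPairsA seenA seenA PySem.Set.empty ↔
      x ∈ PySem.Set.diff
        (PySem.Set.ofList (frontier.flatMap (fun f => seenB.map (fun s => pvMidB f s)))) seenB := by
  rw [mem_newB]
  constructor
  · intro h
    rcases mem_pvPairsA _ _ _ _ h with h' | ⟨p, hp, q, hq, hmid, hx⟩
    · simp [PySem.Set.empty] at h'
    · have hxB : x ∉ seenB := fun hxx => hx ((hAB x).2 hxx)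
      have hpB := (hAB p).1 hp
      have hqB := (hAB q).1 hq
      by_cases hpf : p ∈ frontier
      · exact ⟨⟨p, hpf, q, hqB, by rw [pvMidB_eq_pvMid p q (h3 p hpB) (h3 q hqB)]; exact hmid⟩, hxB⟩
      · by_cases hqf : q ∈ frontier
        · exact ⟨⟨q, hqf, p, hpB, by
            rw [pvMidB_eq_pvMid q p (h3 q hqB) (h3 p hpB), ← pvMid_comm]; exact hmid⟩, hxB⟩
        · exact absurd (hmid ▸ hcl p q hpB hqB hpf hqf) hxB
  · rintro ⟨⟨f, hff, s, hs, hmid⟩, hx⟩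
    have hfB := hf f hff
    have hmid' : pvMid f s = x := by
      rw [← pvMidB_eq_pvMid f s (h3 f hfB) (h3 s hs)]; exact hmid
    have hfA := (hAB f).2 hfB
    have hsA := (hAB s).2 hs
    have hxA : x ∉ seenA := fun hxx => hx ((hAB x).1 hxx)
    by_cases hfs : f = s
    · subst hfs
      exact absurd (by rw [← hmid', pvMid_self f (h3 f hfB)]; exact hfB) hx
    · exact pvPairsA_of_pair seenA x f s hfs hmid' hxA seenA PySem.Set.empty hfA hsA

theorem pvLoop_eq (target : List Int) (fuel : Nat) :
    ∀ (seenA seenB frontier : PySem.Set (List Int)) (g : Int),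
    (∀ p ∈ seenB, p.length = 3) →
    (∀ x, x ∈ seenA ↔ x ∈ seenB) →
    (∀ x ∈ frontier, x ∈ seenB) →
    (∀ a b, a ∈ seenB → b ∈ seenB → a ∉ frontier → b ∉ frontier → pvMid a b ∈ seenB) →
    pvLoopA target fuel seenA g = pvGrow target fuel seenB frontier (g + 1) := by
  induction fuel with
  | zero => intro seenA seenB frontier g _ _ _ _; rfl
  | succ fuel ih =>
      intro seenA seenB frontier g h3 hAB hf hcl
      have hset := newA_eq_newB seenA seenB frontier h3 hAB hf hcl
      simp only [pvLoopA, pvGrow]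
      set newB := PySem.Set.diff
        (PySem.Set.ofList (frontier.flatMap (fun f => seenB.map (fun s => pvMidB f s)))) seenB with hnewB
      have hempty : (pvPairsA seenA seenA PySem.Set.empty = []) ↔ (newB = []) := by
        rw [List.eq_nil_iff_forall_not_mem, List.eq_nil_iff_forall_not_mem]
        exact ⟨fun h x hx => h x ((hset x).2 hx), fun h x hx => h x ((hset x).1 hx)⟩
      by_cases hA : pvPairsA seenA seenA PySem.Set.empty = []
      · rw [if_pos (List.isEmpty_iff.2 hA), if_pos (List.isEmpty_iff.2 (hempty.1 hA))]
      · rw [if_neg (fun h => hA (List.isEmpty_iff.1 h)),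
            if_neg (fun h => (hempty.not.1 hA) (List.isEmpty_iff.1 h))]
        by_cases ht : target ∈ pvPairsA seenA seenA PySem.Set.empty
        · rw [if_pos ht, if_pos ((hset target).1 ht)]
        · rw [if_neg ht, if_neg (fun h => ht ((hset target).2 h))]
          apply ih
          · intro p hp
            rcases (PySem.Set.mem_union _ _ _).1 hp with hp | hp
            · exact h3 p hp
            · rcases (mem_newB _ _ _ _).1 hp with ⟨⟨f, hff, s, hs, hmid⟩, _⟩
              rw [← hmid, pvMidB_eq_pvMid f s (h3 f (hf f hff)) (h3 s hs)]
              exact pvMid_length f s (h3 f (hf f hff)) (h3 s hs)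
          · intro x
            rw [PySem.Set.mem_union, PySem.Set.mem_union, hAB, hset]
          · intro x hx
            exact (PySem.Set.mem_union _ _ _).2 (Or.inr hx)
          · intro a b ha hb hna hnb
            have haB : a ∈ seenB := by
              rcases (PySem.Set.mem_union _ _ _).1 ha with h | h
              · exact h
              · exact absurd h hna
            have hbB : b ∈ seenB := by
              rcases (PySem.Set.mem_union _ _ _).1 hb with h | h
              · exact h
              · exact absurd h hnb
            by_cases hm : pvMid a b ∈ seenB
            · exact (PySem.Set.mem_union _ _ _).2 (Or.inl hm)
            · refine (PySem.Set.mem_union _ _ _).2 (Or.inr ((hset _).1 ?_))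
              have hne : a ≠ b := by
                intro h
                subst h
                exact hm (by rw [pvMid_self a (h3 a haB)]; exact haB)
              exact pvPairsA_of_pair seenA _ a b hne rfl (fun h => hm ((hAB _).1 h))
                seenA PySem.Set.empty ((hAB a).2 haB) ((hAB b).2 hbB)

theorem nodup_all_eq_length_le_one (l : List (List Int)) (hnd : l.Nodup)
    (h : ∀ a ∈ l, ∀ b ∈ l, a = b) : l.length ≤ 1 := by
  match l with
  | [] => simp
  | [a] => simp
  | a :: b :: t =>
      exact absurd (h a (by simp) b (by simp)) (by simp at hnd; tauto)

-- ===== VERDICT (by name: the statement is the Claim_ definition above) =====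
theorem minGenerations_spec : Claim_equal_minGenerations := by
  intro points target _ hpre
  unfold Spec_minGenerations minGenerations minGenerations_alt
  simp only []
  by_cases h1 : target ∈ PySem.Set.ofList points
  · rw [if_pos h1, if_pos h1]
  · rw [if_neg h1, if_neg h1]
    by_cases h2 : PySem.Set.len (PySem.Set.ofList points) < 2
    · rw [if_pos h2, if_pos h2]
    · rw [if_neg h2, if_neg h2]
      have h3 : ∀ p ∈ PySem.Set.ofList points, p.length = 3 := by
        intro p hp
        have hpm : p ∈ points := (PySem.Set.mem_ofList _ _).1 hp
        rcases hpre with hlen | htgt | hall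
        · exact hlen p hpm
        · exact absurd ((PySem.Set.mem_ofList _ _).2 htgt) h1
        · exfalso
          apply h2
          have := nodup_all_eq_length_le_one (PySem.Set.ofList points)
            (PySem.Set.nodup_ofList _)
            (fun a ha b hb => hall a ((PySem.Set.mem_ofList _ _).1 ha) b ((PySem.Set.mem_ofList _ _).1 hb))
          simp only [PySem.Set.len]
          omega
      exact pvLoop_eq target (2 ^ 100) _ _ _ 0 h3 (fun _ => Iff.rfl) (fun _ h => h)
        (fun a _ ha _ hna _ => absurd ha hna)
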